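-- pv_equiv track=rewrite | github.com/thetianshuhuang/sample | hammersley.py | reverse_bin
-- ===== SOURCE A (Python) =====
-- import math
--
-- def reverse_bin(i, power):
--     """Helper method to reverse a binary integer
--
--     Parameters
--     ----------
--     i : int
--         Int to reverse
--
--     Returns
--     -------
--     int
--         i, bitwise reversed
--     """
--
--     reverse = 0
--     while i > 0:
--         reverse *= 2
--         reverse += i % 2
--         i = math.floor(i / 2)
--         power -= 1
--     return reverse * (2**power)
-- ===== SOURCE B (Python) =====
-- def reverse_bin(i, power):
--     """Reverse the binary digits of i via Python's bit-string instead of an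
--     arithmetic divide loop; the padding shift is applied in one step."""
--     if i > 0:
--         bits = bin(i)[2:]              # binary digits, most-significant first
--         rev = int(bits[::-1], 2)       # reversed bits, reinterpreted
--         n = len(bits)
--     else:
--         rev, n = 0, 0
--     return rev * 2 ** (power - n)
-- ===== Notes on version B (the rewrite author's own statement) =====
-- stated objective: idiomatic
-- what changed: Replaces A's arithmetic while-loop (double accumulator, float floor-halving, per-iteration power decrement) by a direct bit-string reversal: bin(i)[2:][::-1] parsed back with int(.,2), with the padding shift 2**(power-bit_length) applied in one step.
-- outside the precondition, e.g. on reverse_bin(1, 0): A returns 0.5, B returns 0.5; on reverse_bin(0, -1): A returns 0.0, B returns 0.0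
import Mathlib
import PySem

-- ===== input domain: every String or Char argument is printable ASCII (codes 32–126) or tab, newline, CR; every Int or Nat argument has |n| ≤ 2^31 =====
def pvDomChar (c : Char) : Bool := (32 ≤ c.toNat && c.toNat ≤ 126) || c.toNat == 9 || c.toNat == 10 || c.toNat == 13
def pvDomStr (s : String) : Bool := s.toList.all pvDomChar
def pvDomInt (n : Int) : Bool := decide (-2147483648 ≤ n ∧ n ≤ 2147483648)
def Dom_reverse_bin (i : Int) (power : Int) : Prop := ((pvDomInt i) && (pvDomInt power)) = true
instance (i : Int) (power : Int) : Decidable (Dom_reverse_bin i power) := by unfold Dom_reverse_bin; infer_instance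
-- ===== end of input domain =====

-- B replaces A's arithmetic divide loop by a bit-string reversal (more idiomatic, same cost);
-- equivalence is about inputs where A's Python result is an int (Pre_ below excludes float results).

-- ===== PORT A =====
-- the while loop, step for step: reverse *= 2; reverse += i % 2; i = floor(i/2); power -= 1
-- (math.floor(i / 2) = floor division for |i| ≤ 2^31, where float division is exact)
def reverseBinLoopA (i reverse power : Int) : Int × Int :=
  if h : 0 < i then
    reverseBinLoopA (PySem.Int.floordiv i 2) (reverse * 2 + PySem.Int.mod i 2) (power - 1)
  else (reverse, power)
termination_by i.toNat
decreasing_by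
  have h2 : PySem.Int.floordiv i 2 = i / 2 := PySem.Int.floordiv_eq_ediv_of_pos (by omega)
  rw [h2]; omega

def reverse_bin (i : Int) (power : Int) : Int :=
  let rp := reverseBinLoopA i 0 power
  -- 2**power: exact (an int) when the final power is ≥ 0, which Pre_ guarantees
  rp.1 * 2 ^ rp.2.toNat

-- ===== PORT B =====
-- bin(i)[2:] ported as the base-2 digit list, most-significant first; int(s, 2) as a foldl;
-- i.bit_length() as PySem.Int.bitLength
def reverse_bin_alt (i : Int) (power : Int) : Int :=
  let rn : Int × Int :=
    if 0 < i then
      let bits := (Nat.digits 2 i.toNat).reverse          -- bin(i)[2:]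
      (bits.reverse.foldl (fun a d => a * 2 + (d : Int)) 0,  -- int(bits[::-1], 2)
       (bits.length : Int))                                -- len(bits) = i.bit_length()
    else (0, 0)
  -- 2**(power - n): exact (an int) when power - n ≥ 0, which Pre_ guarantees
  rn.1 * 2 ^ (power - rn.2).toNat

-- ===== PRECONDITION & SPEC =====
-- Pre_ excludes exactly the inputs on which A's Python returns a float (2**power with a
-- negative final power), i.e. power < bit_length(i) (for i ≤ 0: power < 0): a float is not
-- a value of the declared Int type, so nothing is claimed there.
def Pre_reverse_bin (i : Int) (power : Int) : Prop :=
  (PySem.Int.bitLength i : Int) ≤ power ∨ (i ≤ 0 ∧ 0 ≤ power)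
instance (i : Int) (power : Int) : Decidable (Pre_reverse_bin i power) := by
  unfold Pre_reverse_bin; infer_instance

def pvWitness_reverse_bin : Int × Int := (13, 6)

def Spec_reverse_bin (i : Int) (power : Int) (out : Int) : Prop := out = reverse_bin_alt i power
instance (i : Int) (power : Int) (out : Int) : Decidable (Spec_reverse_bin i power out) := by unfold Spec_reverse_bin; infer_instance

-- ===== CLAIM (what is proved, stated in full; the proofs are below) =====
def Claim_equal_reverse_bin : Prop := ∀ (i : Int) (power : Int), Dom_reverse_bin i power → Pre_reverse_bin i power → Spec_reverse_bin i power (reverse_bin i power)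

-- ===== LEMMAS AND PROOFS =====

-- A's loop on a nonnegative input computes the digit fold of B and decrements power by the digit count
theorem reverseBinLoopA_digits (n : Nat) : ∀ (r p : Int),
    reverseBinLoopA (n : Int) r p =
      ((Nat.digits 2 n).foldl (fun a d => a * 2 + (d : Int)) r,
       p - ((Nat.digits 2 n).length : Int)) := by
  induction n using Nat.strong_induction_on with
  | _ n ih =>
    intro r p
    rcases Nat.eq_zero_or_pos n with h0 | hpos
    · subst h0
      rw [reverseBinLoopA]
      simp
    · rw [reverseBinLoopA]
      have hlt : (0 : Int) < (n : Int) := by exact_mod_cast hpos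
      rw [dif_pos hlt]
      have hdiv : PySem.Int.floordiv (n : Int) 2 = ((n / 2 : Nat) : Int) := by
        exact_mod_cast PySem.Int.floordiv_natCast n 2
      have hmod : PySem.Int.mod (n : Int) 2 = ((n % 2 : Nat) : Int) := by
        exact_mod_cast PySem.Int.mod_natCast n 2
      rw [hdiv, hmod, ih (n / 2) (Nat.div_lt_self hpos (by norm_num))]
      rw [Nat.digits_def' (by norm_num : 1 < 2) hpos]
      simp
      omega

theorem reverse_bin_spec_aux (i power : Int) :
    reverse_bin i power = reverse_bin_alt i power := by
  by_cases hpos : 0 < i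
  · have hi : i = ((i.toNat : Nat) : Int) := by omega
    unfold reverse_bin reverse_bin_alt
    rw [if_pos hpos]
    conv_lhs => rw [hi]
    rw [reverseBinLoopA_digits]
    simp
  · unfold reverse_bin reverse_bin_alt
    rw [reverseBinLoopA, dif_neg hpos, if_neg hpos]
    simp

-- ===== VERDICT (by name: the statement is the Claim_ definition above) =====
theorem reverse_bin_spec : Claim_equal_reverse_bin := by
  intro i power _ _
  exact reverse_bin_spec_aux i power
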